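-- pv_equiv track=rewrite | github.com/shikgom2/boj | 9772.py | check
-- ===== SOURCE A (Python) =====
-- def check(s):
--     idx = 0
--     slen = len(s)
--     if s[0] == '+' or s[0] == '-':
--         idx += 1
--     while idx < slen and s[idx] == '0':
--         idx += 1
--     if idx < slen and s[idx] == '.':
--         idx += 1
--         while idx < slen and s[idx] == '0':
--             idx += 1
--
--     return idx == slen
-- ===== SOURCE B (Python) =====
-- def check(s):
--     # strip an optional leading sign (s[0] raises IndexError on empty, like A)
--     body = s[1:] if s[0] in '+-' else s
--     return set(body) <= {'0', '.'} and body.count('.') <= 1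
-- ===== Notes on version B (the rewrite author's own statement) =====
-- stated objective: simpler
-- what changed: Replaces A's positional pointer scan (skip zeros, optional dot, skip zeros) by a character-set membership test plus a dot count: after stripping an optional sign, the string is zero iff it contains only '0' and '.' with at most one '.'.
import Mathlib
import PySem

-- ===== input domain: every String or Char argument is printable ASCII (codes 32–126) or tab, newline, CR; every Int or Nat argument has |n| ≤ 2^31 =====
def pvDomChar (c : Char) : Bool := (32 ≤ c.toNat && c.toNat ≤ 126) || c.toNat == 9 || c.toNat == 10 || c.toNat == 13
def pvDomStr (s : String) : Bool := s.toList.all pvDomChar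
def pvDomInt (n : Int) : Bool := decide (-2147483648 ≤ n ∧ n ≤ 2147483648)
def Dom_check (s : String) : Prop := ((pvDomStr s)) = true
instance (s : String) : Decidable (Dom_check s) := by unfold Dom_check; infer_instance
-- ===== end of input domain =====

-- B replaces A's positional pointer scan by a character-set test (only '0'/'.') plus a dot count: simpler.
set_option maxRecDepth 4000


-- ===== PORT A =====
-- the while loop 'while idx < slen and s[idx] == '0': idx += 1' as the obvious
-- structural recursion on the remaining suffix (advancing the pointer = dropping the head)
def checkSkipZeros : List Char → List Char
  | [] => []
  | c :: t => if c = '0' then checkSkipZeros t else c :: t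

def check (s : String) : Bool :=
  match s.toList with
  | [] => false              -- A raises IndexError here (excluded by Pre_check)
  | c0 :: t =>
    let rest := if c0 = '+' ∨ c0 = '-' then t else c0 :: t
    match checkSkipZeros rest with
    | '.' :: r => checkSkipZeros r = []     -- 'if s[idx] == '.'' then skip zeros; idx == slen
    | r => r = []                           -- idx == slen

-- ===== PORT B =====
def check_alt (s : String) : Bool :=
  match s.toList with
  | [] => false              -- B raises IndexError here (excluded by Pre_check)
  | c0 :: t =>
    let body := if c0 = '+' ∨ c0 = '-' then t else c0 :: t
    body.all (fun c => c = '0' ∨ c = '.') && body.count '.' ≤ 1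

-- ===== PRECONDITION & SPEC =====
-- Pre_ excludes only the empty string, on which both A and B raise IndexError at s[0].
def Pre_check (s : String) : Prop := s ≠ ""
instance (s : String) : Decidable (Pre_check s) := by unfold Pre_check; infer_instance
def pvWitness_check : String := "0.0"

def Spec_check (s : String) (out : Bool) : Prop := out = check_alt s
instance (s : String) (out : Bool) : Decidable (Spec_check s out) := by unfold Spec_check; infer_instance

-- ===== CLAIM (what is proved, stated in full; the proofs are below) =====
def Claim_equal_check : Prop := ∀ (s : String), Dom_check s → Pre_check s → Spec_check s (check s)

-- ===== LEMMAS AND PROOFS =====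

lemma skipZeros_nil_iff (l : List Char) :
    checkSkipZeros l = [] ↔ l.all (fun c => c = '0') := by
  induction l with
  | nil => simp [checkSkipZeros]
  | cons c t ih =>
    by_cases h : c = '0' <;> simp [checkSkipZeros, h, ih]

lemma body_eq (l : List Char) :
    (match checkSkipZeros l with
      | '.' :: r => decide (checkSkipZeros r = [])
      | r => decide (r = []))
    = (l.all (fun c => decide (c = '0' ∨ c = '.')) && decide (l.count '.' ≤ 1)) := by
  induction l with
  | nil => simp [checkSkipZeros]
  | cons c t ih =>
    by_cases h0 : c = '0'
    · subst h0
      simpa [checkSkipZeros, List.count_cons] using ih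
    · by_cases hd : c = '.'
      · subst hd
        simp only [checkSkipZeros, if_neg (by decide : ¬ ('.' : Char) = '0')]
        simp [skipZeros_nil_iff]
        rw [Bool.eq_iff_iff]
        simp only [decide_eq_true_eq, Bool.and_eq_true, Bool.or_eq_true, List.all_eq_true]
        constructor
        · intro h
          constructor
          · intro c hc; exact Or.inl (h c hc)
          · have : t.count '.' = 0 := by
              rw [List.count_eq_zero]
              intro hmem
              exact (by decide : ¬ ('.' : Char) = '0') (h '.' hmem)
            omega
        · rintro ⟨hall, hcnt⟩ c hc
          rcases hall c hc with h | h
          · exact h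
          · subst h
            have : 1 ≤ t.count '.' := List.one_le_count_iff.mpr hc
            omega
      · simp [checkSkipZeros, if_neg h0]
        cases hsk : checkSkipZeros t <;>
          simp_all [List.all_eq_true]

-- ===== VERDICT (by name: the statement is the Claim_ definition above) =====
theorem check_spec : Claim_equal_check := by
  intro s _ hpre
  unfold Spec_check check check_alt
  cases hs : s.toList with
  | nil => exact absurd (String.toList_eq_nil_iff.mp hs) hpre
  | cons c0 t =>
    simp only
    have := body_eq (if c0 = '+' ∨ c0 = '-' then t else c0 :: t)
    -- both sides are the stated match / boolean on the same 'rest'/'body'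
    split at this <;> simp_all
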